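-- pv_equiv track=rewrite | github.com/Byeong-soo/Algorithm | test/K/second.py | solution
-- ===== SOURCE A (Python) =====
-- def solution(S):
--     delete_count = []
--     B_list = []
--     A_count = 0
--     B_count = 0
--     min_value = float("inf")
--
--     list_S = list(S)
--
--     while list_S:
--         pop = list_S.pop()
--         if pop == "A":
--             A_count += 1
--         else:
--             B_count += 1
--             B_list.append((A_count, B_count))
--
--     b_size = len(B_list)
--     for i in range(b_size-1):
--         cal_value = B_list[i][0] + (B_list[b_size-1][1] - B_list[i][1])
--         if min_value > cal_value:
--             min_value = cal_value
--
--     if A_count == 0 or B_count == 0: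
--         return 0
--
--     if B_list[b_size-1][0] < min_value:
--         return B_list[b_size-1][0]
--
--     return min_value
-- ===== SOURCE B (Python) =====
-- def solution(S):
--     total_A = 0
--     for ch in S:
--         if ch == 'A':
--             total_A += 1
--     if total_A == 0 or total_A == len(S):
--         return 0
--     best = None
--     prefix_B = 0
--     seen_A = 0
--     for ch in S:
--         if ch == 'A':
--             seen_A += 1
--         else:
--             cand = prefix_B + (total_A - seen_A)
--             if best is None or cand < best:
--                 best = cand
--             prefix_B += 1
--     return best
-- ===== Notes on version B (the rewrite author's own statement) =====
-- stated objective: simpler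
-- what changed: A pops the string right-to-left into an explicit B_list of (A_count,B_count) pairs and then scans that list by index plus a separate final-element check; B makes two plain left-to-right passes over the string (count the 'A's, then track prefix non-'A' count and remaining 'A' count, taking a running minimum), building no intermediate list or indices.
import Mathlib
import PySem

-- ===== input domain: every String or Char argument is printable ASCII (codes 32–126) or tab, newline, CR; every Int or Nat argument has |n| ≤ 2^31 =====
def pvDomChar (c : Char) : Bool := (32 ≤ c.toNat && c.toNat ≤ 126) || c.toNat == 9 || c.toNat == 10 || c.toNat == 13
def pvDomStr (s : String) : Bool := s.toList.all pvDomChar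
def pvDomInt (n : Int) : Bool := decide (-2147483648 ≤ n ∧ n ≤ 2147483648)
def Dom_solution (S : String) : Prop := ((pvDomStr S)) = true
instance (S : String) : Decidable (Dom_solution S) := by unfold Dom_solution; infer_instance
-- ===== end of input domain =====

-- B replaces A's reversed pop-loop + index loop over a materialised B_list by two plain
-- left-to-right passes (count the 'A's, then track prefix-B / remaining-A and take the min);
-- objective: simpler (no intermediate list, no indexing)

-- ===== PORT A =====
-- state (A_count, B_count, B_list); the while/pop loop reads S right to left
def aStep (st : Int × Int × List (Int × Int)) (c : Char) : Int × Int × List (Int × Int) :=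
  if c == 'A' then (st.1 + 1, st.2.1, st.2.2)
  else (st.1, st.2.1 + 1, st.2.2 ++ [(st.1, st.2.1 + 1)])

-- float("inf") is modelled as `none`; infGT m x = (min_value > x)
def infGT (m : Option Int) (x : Int) : Bool :=
  match m with
  | none => true
  | some v => decide (x < v)

def solution (S : String) : Int :=
  let st := S.toList.reverse.foldl aStep (0, 0, [])   -- while list_S: pop = list_S.pop() …
  let aCnt := st.1
  let bCnt := st.2.1
  let bl := st.2.2
  let bsize : Int := (bl.length : Int)
  let mval : Option Int :=
    (PySem.List.pyRange 0 (bsize - 1) 1).foldl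
      (fun m i =>
        let e := PySem.List.pyGetD bl i (0, 0)          -- B_list[i] (index in range)
        let last := PySem.List.pyGetD bl (bsize - 1) (0, 0)
        let cal := e.1 + (last.2 - e.2)
        if infGT m cal then some cal else m)
      none
  if aCnt = 0 ∨ bCnt = 0 then 0
  else if infGT mval (PySem.List.pyGetD bl (bsize - 1) (0, 0)).1 then
    (PySem.List.pyGetD bl (bsize - 1) (0, 0)).1
  else mval.getD 0   -- min_value (finite on this branch, so getD's default is never used)

-- ===== PORT B =====
def bStep (totalA : Int) (st : Option Int × Int × Int) (c : Char) : Option Int × Int × Int :=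
  if c == 'A' then (st.1, st.2.1, st.2.2 + 1)
  else
    let cand := st.2.1 + (totalA - st.2.2)
    let best :=
      match st.1 with
      | none => some cand
      | some b => if cand < b then some cand else some b
    (best, st.2.1 + 1, st.2.2)

def solution_alt (S : String) : Int :=
  let totalA : Int := S.toList.foldl (fun a c => if c == 'A' then a + 1 else a) 0
  if totalA = 0 ∨ totalA = PySem.Str.len S then 0
  else
    let st := S.toList.foldl (bStep totalA) (none, 0, 0)
    st.1.getD 0   -- best (never None here: some non-'A' char exists)

-- ===== PRECONDITION & SPEC =====
def Spec_solution (S : String) (out : Int) : Prop := out = solution_alt S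
instance (S : String) (out : Int) : Decidable (Spec_solution S out) := by unfold Spec_solution; infer_instance

-- ===== CLAIM (what is proved, stated in full; the proofs are below) =====
def Claim_equal_solution : Prop := ∀ (S : String), Dom_solution S → Spec_solution S (solution S)

-- ===== LEMMAS AND PROOFS =====

-- count of non-'A' characters, as the Int the ports carry
def pvCB (l : List Char) : Int := (l.countP (fun c => !(c == 'A')) : Int)

-- entries of A's B_list when the pop-loop processes l with initial counters a, b
def pvEnts (a b : Int) : List Char → List (Int × Int)
  | [] => []
  | c :: t => if c == 'A' then pvEnts (a + 1) b t else (a, b + 1) :: pvEnts a (b + 1) t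

-- the candidate costs, left to right: at each non-'A' position, B's-to-the-left + A's-to-the-right
def pvCands (pb : Int) : List Char → List Int
  | [] => []
  | c :: t => if c == 'A' then pvCands pb t else (pb + (t.count 'A' : Int)) :: pvCands (pb + 1) t

-- running minimum on Option Int (none = not yet seen / inf)
def pvOmin (m : Option Int) (x : Int) : Option Int :=
  some (match m with | none => x | some v => min v x)

lemma foldl_aStep (l : List Char) : ∀ (a b : Int) (acc : List (Int × Int)),
    l.foldl aStep (a, b, acc) =
      (a + (l.count 'A' : Int), b + pvCB l, acc ++ pvEnts a b l) := by
  induction l with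
  | nil => intro a b acc; simp [pvCB, pvEnts]
  | cons c t ih =>
      intro a b acc
      by_cases hc : c == 'A' <;>
        simp [aStep, hc, ih, pvEnts, pvCB, List.count_cons] <;> ring_nf

lemma pvEnts_append (l₁ l₂ : List Char) : ∀ (a b : Int),
    pvEnts a b (l₁ ++ l₂) =
      pvEnts a b l₁ ++ pvEnts (a + (l₁.count 'A' : Int)) (b + pvCB l₁) l₂ := by
  induction l₁ with
  | nil => intro a b; simp [pvEnts, pvCB]
  | cons c t ih =>
      intro a b
      by_cases hc : c == 'A' <;>
        simp [pvEnts, hc, ih, pvCB, List.count_cons, add_assoc, add_comm, add_left_comm]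

lemma pvEnts_length (l : List Char) : ∀ (a b : Int),
    ((pvEnts a b l).length : Int) = pvCB l := by
  induction l with
  | nil => intro a b; simp [pvEnts, pvCB]
  | cons c t ih =>
      intro a b
      by_cases hc : c == 'A' <;> simp [pvEnts, hc, ih, pvCB]

lemma pvEnts_getLast₂ (l : List Char) : ∀ (a b : Int) (h : pvEnts a b l ≠ []),
    ((pvEnts a b l).getLast h).2 = b + pvCB l := by
  induction l with
  | nil => intro a b h; simp [pvEnts] at h
  | cons c t ih =>
      intro a b h
      by_cases hc : c == 'A'
      · have := ih (a + 1) b (by simpa [pvEnts, hc] using h)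
        simpa [pvEnts, hc, pvCB, List.countP_cons] using this
      · have hcb : pvCB (c :: t) = pvCB t + 1 := by simp [pvCB, hc]
        by_cases he : pvEnts a (b + 1) t = []
        · have h0 : pvCB t = 0 := by
            have := pvEnts_length t a (b + 1); rw [he] at this; simpa using this.symm
          simp [pvEnts, hc, he, hcb, h0]
        · have h2 := ih a (b + 1) he
          simp only [pvEnts, hc, Bool.false_eq_true, if_false]
          rw [List.getLast_cons he, h2, hcb]
          ring

lemma pvCands_shift (l : List Char) : ∀ (pb d : Int),
    pvCands (pb + d) l = (pvCands pb l).map (· + d) := by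
  induction l with
  | nil => intro pb d; simp [pvCands]
  | cons c t ih =>
      intro pb d
      by_cases hc : c == 'A'
      · simp [pvCands, hc, ih]
      · simp [pvCands, hc]
        constructor
        · ring
        · simpa [add_assoc, add_comm, add_left_comm] using ih (pb + 1) d

lemma pvEnts_map (l : List Char) : ∀ (a b : Int),
    (pvEnts a b l.reverse).map (fun e => e.1 + ((b + pvCB l) - e.2)) = (pvCands a l).reverse := by
  induction l with
  | nil => intro a b; simp [pvEnts, pvCands]
  | cons c t ih =>
      intro a b
      rw [List.reverse_cons, pvEnts_append, List.map_append]
      have hcbrev : pvCB t.reverse = pvCB t := by simp [pvCB]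
      by_cases hc : c == 'A'
      · have hB : pvCB (c :: t) = pvCB t := by simp [pvCB, hc]
        have hsing : pvEnts (a + (t.reverse.count 'A' : Int)) (b + pvCB t.reverse) [c] = [] := by
          simp [pvEnts, hc]
        rw [hsing, hB]
        simp only [List.map_nil, List.append_nil]
        rw [ih a b]
        have hcd : pvCands a (c :: t) = pvCands a t := by simp [pvCands, hc]
        rw [hcd]
      · have hB : pvCB (c :: t) = pvCB t + 1 := by simp [pvCB, hc]
        have hsing : pvEnts (a + (t.reverse.count 'A' : Int)) (b + pvCB t.reverse) [c] =
            [(a + (t.count 'A' : Int), b + pvCB t + 1)] := by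
          simp [pvEnts, hc, hcbrev]
        rw [hsing, hB]
        have hmap2 : List.map (fun e => e.1 + (b + (pvCB t + 1) - e.2)) (pvEnts a b t.reverse) =
            List.map ((fun x => x + 1) ∘ (fun e => e.1 + (b + pvCB t - e.2))) (pvEnts a b t.reverse) := by
          apply List.map_congr_left; intro e _; simp; ring
        rw [hmap2, ← List.map_map, ih a b]
        have hshift : List.map (fun x => x + 1) (pvCands a t) = pvCands (a + 1) t := by
          have := pvCands_shift t a 1
          simpa using this.symm
        have hrevmap : List.map (fun x => x + 1) (pvCands a t).reverse = (pvCands (a + 1) t).reverse := by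
          rw [List.map_reverse, hshift]
        have hRHS : pvCands a (c :: t) = (a + (t.count 'A' : Int)) :: pvCands (a + 1) t := by
          simp [pvCands, hc]
        rw [hrevmap, hRHS, List.reverse_cons]
        congr 1
        simp
        ring

lemma omin_step (m : Option Int) (x : Int) :
    (if infGT m x then some x else m) = pvOmin m x := by
  cases m with
  | none => simp [infGT, pvOmin]
  | some v => by_cases h : x < v <;> simp [infGT, pvOmin, h, min_def]

lemma omin_final (m : Option Int) (x : Int) :
    (if infGT m x then x else m.getD 0) = (pvOmin m x).getD 0 := by
  cases m with
  | none => simp [infGT, pvOmin]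
  | some v => by_cases h : x < v <;> simp [infGT, pvOmin, h, min_def]

lemma omin_swap (l : List Int) : ∀ (m : Option Int) (x : Int),
    l.foldl pvOmin (pvOmin m x) = pvOmin (l.foldl pvOmin m) x := by
  induction l with
  | nil => intro m x; rfl
  | cons y t ih =>
      intro m x
      have hcomm : pvOmin (pvOmin m x) y = pvOmin (pvOmin m y) x := by
        cases m <;> simp [pvOmin, min_comm, min_left_comm]
      simp only [List.foldl_cons, hcomm, ih]

lemma foldl_omin_reverse (l : List Int) : ∀ (m : Option Int),
    l.reverse.foldl pvOmin m = l.foldl pvOmin m := by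
  induction l with
  | nil => intro m; rfl
  | cons x t ih =>
      intro m
      simp only [List.reverse_cons, List.foldl_append, List.foldl_cons, List.foldl_nil, ih]
      rw [← omin_swap]

lemma foldl_bStep (l : List Char) : ∀ (T : Int) (best : Option Int) (pb sa : Int),
    T - sa = (l.count 'A' : Int) →
    (l.foldl (bStep T) (best, pb, sa)).1 = (pvCands pb l).foldl pvOmin best := by
  induction l with
  | nil => intro T best pb sa _; simp [pvCands]
  | cons c t ih =>
      intro T best pb sa hT
      by_cases hc : c == 'A'
      · have ht : T - (sa + 1) = (t.count 'A' : Int) := by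
          have : c = 'A' := by simpa using hc
          simp [this] at hT; omega
        simp [bStep, hc, pvCands, ih T best pb (sa + 1) ht]
      · have ht : T - sa = (t.count 'A' : Int) := by
          simp [List.count_cons, hc] at hT ⊢
          simpa [hc] using hT
        have hcand : pb + (T - sa) = pb + (t.count 'A' : Int) := by omega
        have hbest : (match best with
            | none => some (pb + (T - sa))
            | some b => if pb + (T - sa) < b then some (pb + (T - sa)) else some b) =
            pvOmin best (pb + (t.count 'A' : Int)) := by
          rw [hcand]; cases best with
          | none => rfl
          | some b => by_cases h : pb + (t.count 'A' : Int) < b <;> simp [pvOmin, h, min_def]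
        simp only [List.foldl_cons, bStep, hc, Bool.false_eq_true, if_false, pvCands]
        rw [ih T _ (pb + 1) sa ht, hbest]


-- ===== VERDICT (by name: the statement is the Claim_ definition above) =====

theorem solution_spec : Claim_equal_solution := by
  unfold Claim_equal_solution
  intro S _
  unfold Spec_solution solution solution_alt
  simp only [PySem.Str.len_eq]
  set cs := S.toList with hcs
  have hfoldA := foldl_aStep cs.reverse 0 0 []
  have hcntA : (cs.reverse.count 'A' : Int) = (cs.count 'A' : Int) := by simp
  have hcntB : pvCB cs.reverse = pvCB cs := by simp [pvCB]
  have htotB : S.toList.foldl (fun a c => if c == 'A' then a + 1 else a) 0 = (cs.count 'A' : Int) := by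
    simpa using PySem.List.foldl_beq_add_one cs 'A' 0
  rw [htotB]
  rw [hfoldA, hcntA, hcntB]
  simp only [zero_add, List.nil_append]
  set bl := pvEnts 0 0 cs.reverse with hbl
  have hlen : (bl.length : Int) = pvCB cs := by
    rw [hbl, pvEnts_length cs.reverse 0 0, hcntB]
  have hsum : (cs.length : Int) = (cs.count 'A' : Int) + pvCB cs := by
    have h1 := List.length_eq_countP_add_countP (l := cs) (p := fun c => c == 'A')
    have h2 : cs.count 'A' = cs.countP (fun c => c == 'A') := by simp [List.count]
    have h3 : cs.countP (fun a => decide (¬(a == 'A') = true)) = cs.countP (fun c => !(c == 'A')) := by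
      apply List.countP_congr; intro x _; simp
    unfold pvCB
    rw [h2]
    omega
  by_cases h0 : (cs.count 'A' : Int) = 0 ∨ pvCB cs = 0
  · -- both return 0
    have hB : ((cs.count 'A' : Int) = 0 ∨ (cs.count 'A' : Int) = (cs.length : Int)) := by
      rcases h0 with h | h
      · exact Or.inl h
      · exact Or.inr (by omega)
    rw [if_pos h0, if_pos hB]
  · have h0' := h0
    push Not at h0'
    obtain ⟨hA0, hB0⟩ := h0'
    have hBpos : (0 : Int) < pvCB cs := by
      have hnn : (0 : Int) ≤ pvCB cs := by unfold pvCB; exact Int.natCast_nonneg _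
      omega
    have hnotB : ¬ ((cs.count 'A' : Int) = 0 ∨ (cs.count 'A' : Int) = (cs.length : Int)) := by
      push Not
      exact ⟨hA0, by omega⟩
    rw [if_neg h0, if_neg hnotB]
    -- B_list is nonempty
    have hblne : bl ≠ [] := by
      intro h; rw [h] at hlen; simp at hlen; omega
    -- the last entry of B_list
    have hlast2 : (bl.getLast hblne).2 = pvCB cs := by
      have := pvEnts_getLast₂ cs.reverse 0 0 (by rw [← hbl]; exact hblne)
      simpa [← hbl, hcntB] using this
    have hlenpos : 0 < bl.length := List.length_pos_iff.mpr hblne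
    have hdl : ((bl.dropLast.length : Nat) : Int) = (bl.length : Int) - 1 := by
      simp [List.length_dropLast]; omega
    -- B_list[b_size-1] = last entry
    have hgetlast : PySem.List.pyGetD bl ((bl.length : Int) - 1) (0, 0) = bl.getLast hblne := by
      have h1 : ((bl.length : Int) - 1) = ((bl.length - 1 : Nat) : Int) := by omega
      rw [h1, PySem.List.pyGetD_natCast]
      rw [List.getLast_eq_getElem]
      exact List.getD_eq_getElem bl (0,0) (by omega)
    rw [hgetlast]
    -- the index loop is a fold over B_list without its last element
    have hrange : PySem.List.pyRange 0 ((bl.length : Int) - 1) 1 =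
        PySem.List.pyRange 0 ((bl.dropLast.length : Nat) : Int) 1 := by rw [hdl]
    set cal : Int × Int → Int := fun e => e.1 + ((bl.getLast hblne).2 - e.2) with hcal
    have hcongr :
        (PySem.List.pyRange 0 ((bl.length : Int) - 1) 1).foldl
          (fun m i =>
            if infGT m (cal (PySem.List.pyGetD bl i (0, 0))) then some (cal (PySem.List.pyGetD bl i (0, 0))) else m) none =
        (PySem.List.pyRange 0 ((bl.dropLast.length : Nat) : Int) 1).foldl
          (fun m i =>
            if infGT m (cal (PySem.List.pyGetD bl.dropLast i (0, 0))) then some (cal (PySem.List.pyGetD bl.dropLast i (0, 0))) else m) none := by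
      rw [hrange]
      apply PySem.List.foldl_congr_mem
      intro acc x hx
      have hx' := PySem.List.mem_pyRange_one.mp hx
      have hxlt : x < (bl.length : Int) - 1 := by omega
      have hget : PySem.List.pyGetD bl x (0, 0) = PySem.List.pyGetD bl.dropLast x (0, 0) := by
        rw [PySem.List.pyGetD_eq_getElem bl (0,0) hx'.1 (by omega),
            PySem.List.pyGetD_eq_getElem bl.dropLast (0,0) hx'.1 (by omega)]
        exact (List.getElem_dropLast _).symm
      rw [hget]
    have hfold := PySem.List.foldl_pyRange_pyGetD' bl.dropLast (0, 0)
        (fun m e => if infGT m (cal e) then some (cal e) else m) none (a := 0) (le_refl 0)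
    simp only [Int.toNat_zero, List.drop_zero] at hfold
    -- chain: loop = fold of pvOmin over the mapped candidates
    have hstep : ∀ (m : Option Int) (e : Int × Int),
        (if infGT m (cal e) then some (cal e) else m) = pvOmin m (cal e) := fun m e => omin_step m (cal e)
    have hfold2 : bl.dropLast.foldl (fun m e => if infGT m (cal e) then some (cal e) else m) none =
        (bl.dropLast.map cal).foldl pvOmin none := by
      rw [List.foldl_map]
      exact PySem.List.foldl_congr_mem _ _ _ _ (fun acc x _ => hstep acc x)
    -- assemble A's value
    have hlastcal : cal (bl.getLast hblne) = (bl.getLast hblne).1 := by simp [hcal]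
    have hAval :
        (if infGT ((PySem.List.pyRange 0 ((bl.length : Int) - 1) 1).foldl
            (fun m i =>
              if infGT m (cal (PySem.List.pyGetD bl i (0, 0))) then some (cal (PySem.List.pyGetD bl i (0, 0))) else m) none)
            (bl.getLast hblne).1 then (bl.getLast hblne).1
         else ((PySem.List.pyRange 0 ((bl.length : Int) - 1) 1).foldl
            (fun m i =>
              if infGT m (cal (PySem.List.pyGetD bl i (0, 0))) then some (cal (PySem.List.pyGetD bl i (0, 0))) else m) none).getD 0) =
        ((bl.map cal).foldl pvOmin none).getD 0 := by
      rw [hcongr, hfold, hfold2, ← hlastcal, omin_final]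
      have hsplit : bl.map cal = (bl.map cal).dropLast ++ [(bl.map cal).getLast (by simp [hblne])] :=
        (List.dropLast_append_getLast _).symm
      have hdlm : (bl.map cal).dropLast = bl.dropLast.map cal := List.map_dropLast.symm
      have hglm : (bl.map cal).getLast (by simp [hblne]) = cal (bl.getLast hblne) := List.getLast_map _
      conv_rhs => rw [hsplit]
      rw [List.foldl_append, hdlm, hglm]
      rfl
    rw [hAval]
    -- the mapped candidates are (pvCands 0 cs).reverse
    have hmap : bl.map cal = (pvCands 0 cs).reverse := by
      rw [hbl, hcal, hlast2]
      simpa [zero_add] using pvEnts_map cs 0 0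
    rw [hmap, foldl_omin_reverse]
    -- B's value
    rw [foldl_bStep cs (cs.count 'A' : Int) none 0 0 (by omega)]
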